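-- pv_equiv track=rewrite | github.com/drabenstadtj/lamport-general-systems | model/old/node.py | are_paths_edge_disjoint
-- ===== SOURCE A (Python) =====
-- from typing import List, Dict, Set, Tuple, Optional
--
-- def are_paths_edge_disjoint(path1: List[int], path2: List[int]) -> bool:
--     """Check if two paths are edge-disjoint"""
--     edges1 = set()
--     for i in range(len(path1) - 1):
--         edges1.add(tuple(sorted([path1[i], path1[i + 1]])))
--
--     edges2 = set()
--     for i in range(len(path2) - 1):
--         edges2.add(tuple(sorted([path2[i], path2[i + 1]])))
--
--     return len(edges1.intersection(edges2)) == 0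
-- ===== SOURCE B (Python) =====
-- from typing import List
--
-- def are_paths_edge_disjoint(path1: List[int], path2: List[int]) -> bool:
--     """Check if two paths are edge-disjoint"""
--     # Brute-force pairwise comparison: no set, no normalization.
--     # An undirected edge {a,b} equals {c,d} iff (a,b)==(c,d) or (a,b)==(d,c).
--     return all((a, b) != (c, d) and (a, b) != (d, c)
--                for a, b in zip(path1, path1[1:])
--                for c, d in zip(path2, path2[1:]))
-- ===== Notes on version B (the rewrite author's own statement) =====
-- stated objective: alternative
-- what changed: B drops the sets entirely: it does a brute-force nested scan over the consecutive pairs of both paths, comparing each pair of edges directly in both orientations ((a,b)==(c,d) or (a,b)==(d,c)), with no normalization, no hash set and no intersection; it trades A's linear set-based pass for a quadratic but allocation-free pairwise check.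
import Mathlib
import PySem

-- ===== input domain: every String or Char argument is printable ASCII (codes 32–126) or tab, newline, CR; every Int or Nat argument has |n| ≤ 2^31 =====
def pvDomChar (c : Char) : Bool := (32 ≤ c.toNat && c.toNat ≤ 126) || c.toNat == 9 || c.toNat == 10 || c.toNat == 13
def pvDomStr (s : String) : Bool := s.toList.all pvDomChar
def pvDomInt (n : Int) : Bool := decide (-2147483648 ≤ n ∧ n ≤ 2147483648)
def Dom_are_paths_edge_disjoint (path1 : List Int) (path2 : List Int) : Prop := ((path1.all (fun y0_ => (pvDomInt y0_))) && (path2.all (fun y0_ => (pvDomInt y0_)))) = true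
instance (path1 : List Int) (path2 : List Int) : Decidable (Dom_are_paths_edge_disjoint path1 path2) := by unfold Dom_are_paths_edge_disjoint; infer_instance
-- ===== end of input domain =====

-- B replaces A's two hash sets and intersection by a brute-force nested scan over the
-- consecutive pairs of both paths, comparing edges directly in both orientations
-- (no set, no normalization); an alternative of different shape, not claimed faster.

-- ===== PORT A =====
-- tuple(sorted([a, b])) on a 2-element list: exact (Python's sort puts the smaller first, keeps order on ties)
def pvNormEdge (a b : Int) : Int × Int := if a ≤ b then (a, b) else (b, a)

def are_paths_edge_disjoint (path1 : List Int) (path2 : List Int) : Bool :=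
  let edges1 : PySem.Set (Int × Int) :=
    (PySem.List.pyRange 0 ((path1.length : Int) - 1) 1).foldl
      (fun s i => PySem.Set.add s (pvNormEdge (PySem.List.pyGetD path1 i 0) (PySem.List.pyGetD path1 (i + 1) 0))) []
  let edges2 : PySem.Set (Int × Int) :=
    (PySem.List.pyRange 0 ((path2.length : Int) - 1) 1).foldl
      (fun s i => PySem.Set.add s (pvNormEdge (PySem.List.pyGetD path2 i 0) (PySem.List.pyGetD path2 (i + 1) 0))) []
  decide (PySem.Set.len (PySem.Set.inter edges1 edges2) = 0)

-- ===== PORT B =====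
-- all( (a,b) != (c,d) and (a,b) != (d,c) for a,b in zip(path1, path1[1:]) for c,d in zip(path2, path2[1:]) )
def are_paths_edge_disjoint_alt (path1 : List Int) (path2 : List Int) : Bool :=
  (path1.zip path1.tail).all (fun q =>
    (path2.zip path2.tail).all (fun r =>
      decide ((q.1, q.2) ≠ (r.1, r.2)) && decide ((q.1, q.2) ≠ (r.2, r.1))))

-- ===== PRECONDITION & SPEC =====
def Spec_are_paths_edge_disjoint (path1 : List Int) (path2 : List Int) (out : Bool) : Prop := out = are_paths_edge_disjoint_alt path1 path2
instance (path1 : List Int) (path2 : List Int) (out : Bool) : Decidable (Spec_are_paths_edge_disjoint path1 path2 out) := by unfold Spec_are_paths_edge_disjoint; infer_instance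

-- ===== CLAIM (what is proved, stated in full; the proofs are below) =====
def Claim_equal_are_paths_edge_disjoint : Prop := ∀ (path1 : List Int) (path2 : List Int), Dom_are_paths_edge_disjoint path1 path2 → Spec_are_paths_edge_disjoint path1 path2 (are_paths_edge_disjoint path1 path2)

-- ===== LEMMAS AND PROOFS =====

-- indexing consecutive pairs by range equals zipping the list with its tail
lemma pv_shift (x : Int) (xs : List Int) (k : Nat) (d : Int) :
    PySem.List.pyGetD (x::xs) ((k : Int) + 1) d = PySem.List.pyGetD xs k d := by
  have h1 : ((k : Int) + 1) = ((k+1 : Nat) : Int) := by push_cast; ring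
  rw [h1, PySem.List.pyGetD_natCast, PySem.List.pyGetD_natCast]
  simp

lemma pv_map_range_pairs {α : Type} (l : List Int) (f : Int → Int → α) :
    (PySem.List.pyRange 0 ((l.length : Int) - 1) 1).map
      (fun i => f (PySem.List.pyGetD l i 0) (PySem.List.pyGetD l (i + 1) 0))
    = (l.zip l.tail).map (fun p => f p.1 p.2) := by
  induction l with
  | nil => simp [PySem.List.pyRange_one_eq_nil]
  | cons a t ih =>
      cases t with
      | nil => simp [PySem.List.pyRange_one_eq_nil]
      | cons b t' =>
          rw [PySem.List.pyRange_one_cons (by simp)]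
          simp only [List.map_cons, List.zip_cons_cons, List.tail_cons]
          congr 1
          · have h0 : PySem.List.pyGetD (a::b::t') 0 0 = a := by simp
            have h1 : PySem.List.pyGetD (a::b::t') (0+1) 0 = b := by simpa using pv_shift a (b::t') 0 0
            rw [h0, h1]
          · simp only [List.tail_cons] at ih
            rw [← ih]
            rw [PySem.List.pyRange_one, PySem.List.pyRange_one]
            simp only [List.map_map, zero_add, sub_zero]
            have hm : ((((a :: b :: t').length : Int) - 1) - 1).toNat
                    = (((b :: t').length : Int) - 1).toNat := by simp
            rw [hm]
            apply List.map_congr_left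
            intro k _
            simp only [Function.comp]
            rw [show (1 : Int) + (k : Int) = (k : Int) + 1 by ring]
            rw [pv_shift]
            rw [show (k : Int) + 1 + 1 = ((k+1 : Nat) : Int) + 1 by push_cast; ring]
            rw [pv_shift]
            push_cast
            ring_nf

-- A's foldl-built set is set(list-of-normalized-edges)
lemma pv_edges_eq (l : List Int) :
    (PySem.List.pyRange 0 ((l.length : Int) - 1) 1).foldl
      (fun s i => PySem.Set.add s (pvNormEdge (PySem.List.pyGetD l i 0) (PySem.List.pyGetD l (i + 1) 0))) []
    = PySem.Set.ofList ((l.zip l.tail).map (fun p => pvNormEdge p.1 p.2)) := by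
  rw [← PySem.Set.update_map_eq_foldl_add, PySem.Set.update_nil_left,
      pv_map_range_pairs l (fun a b => pvNormEdge a b)]

-- equal normalized edges ↔ equal in one of the two orientations
lemma pv_norm_eq_iff (a b c d : Int) :
    pvNormEdge a b = pvNormEdge c d ↔ ((a, b) = (c, d) ∨ (a, b) = (d, c)) := by
  unfold pvNormEdge
  split_ifs <;> simp only [Prod.mk.injEq] <;> omega

-- ===== VERDICT (by name: the statement is the Claim_ definition above) =====
theorem are_paths_edge_disjoint_spec : Claim_equal_are_paths_edge_disjoint := by
  intro path1 path2 _
  unfold Spec_are_paths_edge_disjoint are_paths_edge_disjoint are_paths_edge_disjoint_alt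
  simp only [pv_edges_eq]
  rw [Bool.eq_iff_iff, decide_eq_true_iff]
  simp only [List.all_eq_true, Bool.and_eq_true, decide_eq_true_iff]
  simp only [PySem.Set.len, PySem.Set.inter]
  rw [Int.natCast_eq_zero, List.length_eq_zero_iff, List.filter_eq_nil_iff]
  simp only [PySem.Set.contains_iff, PySem.Set.mem_ofList, List.mem_map, not_exists, not_and]
  constructor
  · intro h q hq r hr
    have hne : pvNormEdge q.1 q.2 ≠ pvNormEdge r.1 r.2 :=
      fun e => h _ ⟨q, hq, rfl⟩ r hr e.symm
    simpa [pv_norm_eq_iff, not_or] using hne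
  · intro h x hx1 r hr hx2
    obtain ⟨q, hq, hqe⟩ := hx1
    have hne : pvNormEdge q.1 q.2 ≠ pvNormEdge r.1 r.2 := by
      simpa [pv_norm_eq_iff, not_or] using h q hq r hr
    exact hne (hqe.trans hx2.symm)
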